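-- pv_equiv track=rewrite | github.com/earthsight-contributors/earthsight | simulator/src/multitask_formula.py | find_highest_satisfied_priority
-- ===== SOURCE A (Python) =====
-- def find_highest_satisfied_priority(formula, assignment):
--     """
--     Find the highest priority of any satisfied term in the original formula.
--
--     Formula structure: [(term, priority), ...] where term is [(filter_id, polarity), ...]
--     """
--     highest_priority = 0
--
--     for term_tuple in formula:
--         term = term_tuple[0]  # Extract the term (list of filter conditions)
--         priority = term_tuple[1]  # Extract the priority
--
--         satisfied = True
--
--         for filter_condition in term:
--             fid = filter_condition[0]  # Extract filter ID
--             polarity = filter_condition[1]  # Extract polarity (True/False)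
--
--             if fid not in assignment or assignment[fid] != polarity:
--                 satisfied = False
--                 break
--
--         if satisfied and priority > highest_priority:
--             highest_priority = priority
--
--     return highest_priority
-- ===== SOURCE B (Python) =====
-- def find_highest_satisfied_priority(formula, assignment):
--     """Sort terms by priority descending, return the first satisfied positive priority."""
--     for term, priority in sorted(formula, key=lambda tp: tp[1], reverse=True):
--         if priority <= 0:
--             return 0
--         if all(fid in assignment and assignment[fid] == polarity for fid, polarity in term):
--             return priority
--     return 0
-- ===== Notes on version B (the rewrite author's own statement) =====
-- stated objective: alternative
-- what changed: Replaces A's full scan tracking a running maximum with sorting terms by priority descending and returning the first satisfied term's priority (early exit; stops at non-positive priorities).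
import Mathlib
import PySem

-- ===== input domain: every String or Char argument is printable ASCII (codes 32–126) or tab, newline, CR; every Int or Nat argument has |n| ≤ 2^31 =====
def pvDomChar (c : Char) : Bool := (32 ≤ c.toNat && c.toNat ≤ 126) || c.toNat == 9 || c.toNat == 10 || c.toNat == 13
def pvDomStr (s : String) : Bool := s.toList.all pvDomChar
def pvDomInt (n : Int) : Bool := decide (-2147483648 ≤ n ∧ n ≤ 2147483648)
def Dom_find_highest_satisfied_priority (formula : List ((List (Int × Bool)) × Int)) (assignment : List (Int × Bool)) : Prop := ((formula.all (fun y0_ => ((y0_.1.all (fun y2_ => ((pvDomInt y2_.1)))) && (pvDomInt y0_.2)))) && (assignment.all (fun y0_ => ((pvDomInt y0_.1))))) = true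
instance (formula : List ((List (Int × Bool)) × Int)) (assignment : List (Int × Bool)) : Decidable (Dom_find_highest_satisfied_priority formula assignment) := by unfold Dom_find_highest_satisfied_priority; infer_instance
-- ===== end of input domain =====

-- B sorts the terms by priority descending and returns the first satisfied term's
-- positive priority (early exit), instead of A's full scan tracking a running maximum.


-- ===== PORT A =====
-- inner loop of A: walks the term's conditions, breaking (false) at the first failure
def pvSatA (assignment : List (Int × Bool)) : List (Int × Bool) → Bool
  | [] => true
  | (fid, polarity) :: rest =>
    match (PySem.Dict.mk assignment).get? fid with
    | none => false                                   -- fid not in assignment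
    | some v => if v != polarity then false else pvSatA assignment rest

def find_highest_satisfied_priority (formula : List ((List (Int × Bool)) × Int)) (assignment : List (Int × Bool)) : Int :=
  formula.foldl
    (fun highest_priority term_tuple =>
      let term := term_tuple.1
      let priority := term_tuple.2
      if pvSatA assignment term && decide (priority > highest_priority) then priority
      else highest_priority)
    0

-- ===== PORT B =====
-- `all(fid in assignment and assignment[fid] == polarity for fid, polarity in term)`
def pvSatB (assignment : List (Int × Bool)) (term : List (Int × Bool)) : Bool :=
  term.all (fun fp => ((PySem.Dict.mk assignment).get? fp.1).any (fun v => v == fp.2))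

-- the for-loop over the sorted list with its two early returns
def pvScanB (assignment : List (Int × Bool)) : List ((List (Int × Bool)) × Int) → Int
  | [] => 0
  | (term, priority) :: rest =>
    if priority ≤ 0 then 0
    else if pvSatB assignment term then priority
    else pvScanB assignment rest

def find_highest_satisfied_priority_alt (formula : List ((List (Int × Bool)) × Int)) (assignment : List (Int × Bool)) : Int :=
  pvScanB assignment (PySem.List.sorted formula (fun tp => tp.2) true)

-- ===== PRECONDITION & SPEC =====
def Spec_find_highest_satisfied_priority (formula : List ((List (Int × Bool)) × Int)) (assignment : List (Int × Bool)) (out : Int) : Prop := out = find_highest_satisfied_priority_alt formula assignment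
instance (formula : List ((List (Int × Bool)) × Int)) (assignment : List (Int × Bool)) (out : Int) : Decidable (Spec_find_highest_satisfied_priority formula assignment out) := by unfold Spec_find_highest_satisfied_priority; infer_instance

-- ===== CLAIM (what is proved, stated in full; the proofs are below) =====
def Claim_equal_find_highest_satisfied_priority : Prop := ∀ (formula : List ((List (Int × Bool)) × Int)) (assignment : List (Int × Bool)), Dom_find_highest_satisfied_priority formula assignment → Spec_find_highest_satisfied_priority formula assignment (find_highest_satisfied_priority formula assignment)

-- ===== LEMMAS AND PROOFS =====

-- the two satisfaction checks agree
lemma satA_eq_satB (a : List (Int × Bool)) (t : List (Int × Bool)) :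
    pvSatA a t = pvSatB a t := by
  induction t with
  | nil => rfl
  | cons hd tl ih =>
    obtain ⟨fid, pol⟩ := hd
    simp only [pvSatA, pvSatB, List.all_cons]
    cases h : (PySem.Dict.mk a).get? fid with
    | none => simp
    | some v =>
      simp only [Option.any_some, bne]
      by_cases hv : v = pol <;> simp [hv, pvSatB, ih]

-- canonical value: fold of max over the priorities of satisfied terms
def pvSatPs (a : List (Int × Bool)) (l : List ((List (Int × Bool)) × Int)) : List Int :=
  (l.filter (fun tp => pvSatA a tp.1)).map Prod.snd

lemma satPs_cons (a : List (Int × Bool)) (t : List (Int × Bool)) (p : Int)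
    (tl : List ((List (Int × Bool)) × Int)) :
    pvSatPs a ((t, p) :: tl) = if pvSatA a t then p :: pvSatPs a tl else pvSatPs a tl := by
  simp only [pvSatPs, List.filter_cons]
  split <;> simp

lemma mem_satPs_le (a : List (Int × Bool)) (_t : List (Int × Bool)) (p : Int)
    (tl : List ((List (Int × Bool)) × Int)) (hall : ∀ y ∈ tl, y.2 ≤ p)
    (x : Int) (hx : x ∈ pvSatPs a tl) : x ≤ p := by
  simp only [pvSatPs, List.mem_map, List.mem_filter] at hx
  obtain ⟨tp, htp, rfl⟩ := hx
  exact hall tp htp.1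

lemma foldl_max_of_le (l : List Int) (acc : Int) (h : ∀ x ∈ l, x ≤ acc) :
    l.foldl max acc = acc := by
  induction l generalizing acc with
  | nil => rfl
  | cons hd tl ih =>
    simp only [List.foldl_cons]
    rw [max_eq_left (h hd (by simp))]
    exact ih acc (fun x hx => h x (by simp [hx]))

-- A computes the fold of max over satisfied priorities
lemma A_eq_fold (a : List (Int × Bool)) (l : List ((List (Int × Bool)) × Int)) (acc : Int) :
    l.foldl
      (fun hp tp => if pvSatA a tp.1 && decide (tp.2 > hp) then tp.2 else hp) acc
    = (pvSatPs a l).foldl max acc := by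
  induction l generalizing acc with
  | nil => rfl
  | cons hd tl ih =>
    obtain ⟨t, p⟩ := hd
    rw [List.foldl_cons, satPs_cons]
    by_cases hs : pvSatA a t
    · rw [if_pos hs, List.foldl_cons]
      by_cases hp : p > acc
      · rw [show (if (pvSatA a t && decide (p > acc)) = true then p else acc) = p by
            simp [hs, hp]]
        rw [ih, max_eq_right (le_of_lt hp)]
      · rw [show (if (pvSatA a t && decide (p > acc)) = true then p else acc) = acc by
            simp [hs, hp]]
        rw [ih, max_eq_left (le_of_not_gt hp)]
    · rw [if_neg hs,
        show (if (pvSatA a t && decide (p > acc)) = true then p else acc) = acc by simp [hs]]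
      exact ih acc

-- B's scan on a descending-sorted list computes the same fold
lemma scanB_eq_fold (a : List (Int × Bool)) (l : List ((List (Int × Bool)) × Int))
    (hsort : l.Pairwise (fun x y => y.2 ≤ x.2)) :
    pvScanB a l = (pvSatPs a l).foldl max 0 := by
  induction l with
  | nil => rfl
  | cons hd tl ih =>
    obtain ⟨t, p⟩ := hd
    rw [List.pairwise_cons] at hsort
    obtain ⟨hall, htl⟩ := hsort
    simp only [pvScanB, ← satA_eq_satB]
    by_cases hp : p ≤ 0
    · rw [if_pos hp]
      symm
      apply foldl_max_of_le
      intro x hx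
      rw [satPs_cons] at hx
      by_cases hs : pvSatA a t
      · rw [if_pos hs, List.mem_cons] at hx
        rcases hx with rfl | hx
        · exact hp
        · exact le_trans (mem_satPs_le a t p tl hall x hx) hp
      · rw [if_neg hs] at hx
        exact le_trans (mem_satPs_le a t p tl hall x hx) hp
    · rw [if_neg hp, satPs_cons]
      by_cases hs : pvSatA a t
      · rw [if_pos hs, if_pos hs, List.foldl_cons,
          max_eq_right (by omega : (0 : Int) ≤ p)]
        exact (foldl_max_of_le _ p (mem_satPs_le a t p tl hall)).symm
      · rw [if_neg hs, if_neg hs]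
        exact ih htl

-- fold of max is invariant under permutation
lemma foldl_max_perm (l₁ l₂ : List Int) (h : l₁.Perm l₂) (acc : Int) :
    l₁.foldl max acc = l₂.foldl max acc :=
  h.foldl_eq acc

-- ===== VERDICT (by name: the statement is the Claim_ definition above) =====
theorem find_highest_satisfied_priority_spec : Claim_equal_find_highest_satisfied_priority := by
  intro formula assignment _
  unfold Spec_find_highest_satisfied_priority find_highest_satisfied_priority find_highest_satisfied_priority_alt
  rw [A_eq_fold]
  rw [scanB_eq_fold assignment _ (PySem.List.sorted_pairwise_rev formula (fun tp => tp.2))]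
  apply foldl_max_perm
  exact (((PySem.List.sorted_perm formula (fun tp => tp.2) true).filter _).map _).symm
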